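-- pv_equiv track=rewrite | github.com/green-fox-academy/tedlsx | week-5/day-3/str_again.py | str_again
-- ===== SOURCE A (Python) =====
-- def str_again(word):
--     if len(word) == 1:
--         return word[-1]
--     else:
--         if word[0] == "x":
--             return str_again(word[1:])
--         else:
--             return word[0] + str_again(word[1:])
-- ===== SOURCE B (Python) =====
-- def str_again(word):
--     # strip 'x' from everything but the last character, which is always kept
--     return word[:-1].replace("x", "") + word[-1]
-- ===== Notes on version B (the rewrite author's own statement) =====
-- stated objective: idiomatic
-- what changed: Replaces the character-by-character recursion with a single closed-form str.replace on word[:-1] plus re-attaching word[-1].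
import Mathlib
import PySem

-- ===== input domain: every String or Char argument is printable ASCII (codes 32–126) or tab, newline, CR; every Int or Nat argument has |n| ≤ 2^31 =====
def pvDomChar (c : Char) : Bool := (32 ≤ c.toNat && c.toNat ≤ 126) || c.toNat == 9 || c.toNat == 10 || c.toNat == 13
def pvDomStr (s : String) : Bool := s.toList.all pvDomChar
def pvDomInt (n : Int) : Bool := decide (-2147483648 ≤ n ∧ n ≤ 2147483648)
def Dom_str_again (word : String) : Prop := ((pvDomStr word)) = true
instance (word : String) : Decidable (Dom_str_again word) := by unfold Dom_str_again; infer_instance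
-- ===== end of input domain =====

-- B replaces A's char-by-char recursion with word[:-1].replace('x','') + word[-1] (one library pass); return values agree on all non-empty words, both raise IndexError on "".


-- ===== PORT A =====
-- the recursion of A on the character list: len==1 → word[-1]; word[0]=='x' → rec on tail; else word[0] ++ rec on tail
-- ([] is unreachable under Pre_: Python raises IndexError at word[0] there)
def strAgainGo : List Char → List Char
  | [] => []
  | [c] => [c]
  | c :: c' :: t => if c = 'x' then strAgainGo (c' :: t) else c :: strAgainGo (c' :: t)

def str_again (word : String) : String := String.ofList (strAgainGo word.toList)

-- ===== PORT B =====
-- word[:-1].replace("x", "") + word[-1]; the none branch is Python's IndexError on "", excluded by Pre_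
def str_again_alt (word : String) : String :=
  match PySem.List.pyGet? word.toList (-1) with
  | none => ""
  | some c => (PySem.Str.replace (PySem.Str.slice word none (some (-1))) "x" "").push c

-- ===== PRECONDITION & SPEC =====
-- Pre_ excludes only the empty string, on which both A (word[0]) and B (word[-1]) raise IndexError.
def Pre_str_again (word : String) : Prop := word ≠ ""
instance (word : String) : Decidable (Pre_str_again word) := by unfold Pre_str_again; infer_instance
def pvWitness_str_again : String := "exact"

def Spec_str_again (word : String) (out : String) : Prop := out = str_again_alt word
instance (word : String) (out : String) : Decidable (Spec_str_again word out) := by unfold Spec_str_again; infer_instance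

-- ===== CLAIM (what is proved, stated in full; the proofs are below) =====
def Claim_equal_str_again : Prop := ∀ (word : String), Dom_str_again word → Pre_str_again word → Spec_str_again word (str_again word)

-- ===== LEMMAS AND PROOFS =====

-- Chars.replace with a one-char pattern and empty replacement is a filter
theorem replaceGo_filter_x (l acc : List Char) (fuel : Nat) (h : l.length ≤ fuel) :
    PySem.Chars.replace.go ['x'] [] fuel l acc = acc.reverse ++ l.filter (fun c => !(c == 'x')) := by
  induction l generalizing fuel acc with
  | nil => cases fuel <;> simp [PySem.Chars.replace.go]
  | cons c t ih =>
    cases fuel with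
    | zero => simp at h
    | succ n =>
      simp only [List.length_cons, Nat.succ_le_succ_iff] at h
      by_cases hc : c = 'x'
      · subst hc
        simp [PySem.Chars.replace.go, List.isPrefixOf, ih _ _ h]
      · have hp : List.isPrefixOf ['x'] (c :: t) = false := by
          simp [List.isPrefixOf]; exact fun he => (hc he.symm).elim
        simp [PySem.Chars.replace.go, hp, ih _ _ h, hc]

theorem replace_filter_x (l : List Char) :
    PySem.Chars.replace l ['x'] [] = l.filter (fun c => !(c == 'x')) := by
  simpa using replaceGo_filter_x l [] l.length le_rfl

-- A's recursion computes filter-on-dropLast plus the kept last character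
theorem strAgainGo_eq (l : List Char) (h : l ≠ []) :
    strAgainGo l = l.dropLast.filter (fun c => !(c == 'x')) ++ [l.getLast h] := by
  induction l with
  | nil => exact absurd rfl h
  | cons c t ih =>
    cases t with
    | nil => simp [strAgainGo]
    | cons c' t' =>
      have ht : (c' :: t') ≠ ([] : List Char) := by simp
      by_cases hc : c = 'x'
      · subst hc
        simp [strAgainGo, ih ht, List.getLast]
      · simp [strAgainGo, hc, ih ht, List.getLast]

-- ===== VERDICT (by name: the statement is the Claim_ definition above) =====
theorem str_again_spec : Claim_equal_str_again := by
  intro word _ hpre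
  have hl : word.toList ≠ [] := by
    intro h
    exact hpre (by simp_all)
  unfold Spec_str_again str_again str_again_alt
  have hget : PySem.List.pyGet? word.toList (-1) = some (word.toList.getLast hl) := by
    rw [show (-1 : Int) = -((1 : Nat) : Int) by norm_num]
    rw [PySem.List.pyGet?_neg_natCast _ 1 (by omega) (by simpa using List.length_pos_iff.mpr hl)]
    simp [List.getLast_eq_getElem]
  rw [hget]
  have hsl : (PySem.Str.slice word none (some (-1))).toList = word.toList.dropLast := by
    simp [PySem.Str.toList_slice, PySem.List.slice_to_neg_one]
  apply String.toList_injective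
  simp [strAgainGo_eq word.toList hl, PySem.Str.toList_replace, hsl, replace_filter_x,
    String.toList_ofList]
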